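-- pv_equiv track=rewrite | github.com/PyRepair/maniple | preliminary-study/extractor.py | _split_error_message
-- ===== SOURCE A (Python) =====
-- from typing import List
--
-- def _split_error_message(error_message) -> List[dict]:
--     lines = error_message.split("\n")
--     chunks = []
--     current_chunk = []
--     current_label = ""
--
--     for line in lines:
--         # Determine if the line is an error message or stacktrace
--         label = "error_message" if line.startswith("E") else "stacktrace"
--
--         # If we are starting a new chunk, add the previous chunk to the list
--         if label != current_label and current_chunk:
--             record = {"label": current_label, "content": "\n".join(current_chunk)}
--             chunks.append(record)
--             current_chunk = []
--
--         # Add the line to the current chunk and update the current label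
--         current_chunk.append(line)
--         current_label = label
--
--     # Add the last chunk to the list
--     if current_chunk:
--         record = {"label": current_label, "content": "\n".join(current_chunk)}
--         chunks.append(record)
--
--     return chunks
-- ===== SOURCE B (Python) =====
-- from typing import List
--
-- def _split_error_message(error_message) -> List[dict]:
--     lines = error_message.split("\n")
--     labels = ["error_message" if line.startswith("E") else "stacktrace"
--               for line in lines]
--     n = len(lines)
--     cuts = [0] + [i for i in range(1, n) if labels[i] != labels[i - 1]] + [n]
--     return [{"label": labels[s], "content": "\n".join(lines[s:e])}
--             for s, e in zip(cuts, cuts[1:])]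
-- ===== Notes on version B (the rewrite author's own statement) =====
-- stated objective: alternative
-- what changed: Replaces A's single-pass accumulator loop (current_chunk/current_label with a flush at each label change and after the loop) by three staged passes: a label list, a list of cut indices where the label changes, and slicing the lines between consecutive cut pairs.
import Mathlib
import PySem

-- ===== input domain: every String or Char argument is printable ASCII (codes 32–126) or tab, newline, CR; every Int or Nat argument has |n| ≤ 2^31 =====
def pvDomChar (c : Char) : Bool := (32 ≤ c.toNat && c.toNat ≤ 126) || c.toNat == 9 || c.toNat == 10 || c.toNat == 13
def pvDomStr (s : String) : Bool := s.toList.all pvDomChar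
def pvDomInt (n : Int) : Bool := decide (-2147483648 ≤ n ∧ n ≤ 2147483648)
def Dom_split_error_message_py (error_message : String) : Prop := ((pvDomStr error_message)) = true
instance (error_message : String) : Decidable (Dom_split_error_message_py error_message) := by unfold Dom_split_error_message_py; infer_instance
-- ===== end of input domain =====

-- B replaces A's single-pass current_chunk/current_label accumulator loop by three staged
-- passes: a label list, a list of cut indices where the label changes, then slicing the
-- lines between consecutive cuts (alternative decomposition; same cost).

-- line's label, as both Pythons compute it ("error_message" if line.startswith("E") else "stacktrace")
def pvKey (line : String) : String :=
  if PySem.Str.startswith line "E" then "error_message" else "stacktrace"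

-- ===== PORT A =====
-- the for-loop of A, state = (chunks, current_chunk, current_label); after the loop the
-- trailing 'if current_chunk:' flush
def splitLoopA (lines : List String) (chunks : List (List (String × String)))
    (cur : List String) (lab : String) : List (List (String × String)) :=
  match lines with
  | [] =>
      if cur ≠ [] then chunks ++ [[("label", lab), ("content", PySem.Str.join "\n" cur)]]
      else chunks
  | line :: rest =>
      let label := pvKey line
      if label ≠ lab ∧ cur ≠ [] then
        splitLoopA rest (chunks ++ [[("label", lab), ("content", PySem.Str.join "\n" cur)]])
          [line] label
      else
        splitLoopA rest chunks (cur ++ [line]) label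

def split_error_message_py (error_message : String) : List (List (String × String)) :=
  splitLoopA ((PySem.Str.split? error_message "\n").getD []) [] [] ""

-- ===== PORT B =====
-- Source B: labels per line; cut indices [0] ++ [i in range(1,n) with labels[i] != labels[i-1]] ++ [n];
-- one record per consecutive pair of cuts, slicing lines[s:e].
-- labels[i] is always in range here, so the pyGetD default "" is never read.
def split_error_message_py_alt (error_message : String) : List (List (String × String)) :=
  let lines := (PySem.Str.split? error_message "\n").getD []
  let labels := lines.map pvKey
  let n : Int := lines.length
  let cuts : List Int :=
    0 :: (PySem.List.pyRange 1 n 1).filter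
          (fun i => decide (PySem.List.pyGetD labels i "" ≠ PySem.List.pyGetD labels (i - 1) ""))
        ++ [n]
  (cuts.zip cuts.tail).map (fun se =>
    [("label", PySem.List.pyGetD labels se.1 ""),
     ("content", PySem.Str.join "\n" (PySem.List.slice lines (some se.1) (some se.2)))])

-- ===== PRECONDITION & SPEC =====
def Spec_split_error_message_py (error_message : String) (out : List (List (String × String))) : Prop := out = split_error_message_py_alt error_message
instance (error_message : String) (out : List (List (String × String))) : Decidable (Spec_split_error_message_py error_message out) := by unfold Spec_split_error_message_py; infer_instance

-- ===== CLAIM (what is proved, stated in full; the proofs are below) =====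
def Claim_equal_split_error_message_py : Prop := ∀ (error_message : String), Dom_split_error_message_py error_message → Spec_split_error_message_py error_message (split_error_message_py error_message)

-- ===== LEMMAS AND PROOFS =====

-- proof-side run decomposition: maximal prefix of xs whose key is k, and the remainder
def takeRunB (k : String) : List String → List String × List String
  | [] => ([], [])
  | x :: xs =>
      if pvKey x = k then
        let p := takeRunB k xs
        (x :: p.1, p.2)
      else ([], x :: xs)

theorem takeRunB_snd_length (k : String) (xs : List String) :
    (takeRunB k xs).2.length ≤ xs.length := by
  induction xs with
  | nil => simp [takeRunB]
  | cons x xs ih =>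
      simp only [takeRunB]
      split
      · exact Nat.le_succ_of_le (by simpa using ih)
      · simp

theorem takeRunB_append (k : String) (xs : List String) :
    (takeRunB k xs).1 ++ (takeRunB k xs).2 = xs := by
  induction xs with
  | nil => simp [takeRunB]
  | cons x xs ih =>
      simp only [takeRunB]
      split
      · simpa using ih
      · simp

-- canonical chunk list, one record per consecutive run
def groupsB : List String → List (List (String × String))
  | [] => []
  | x :: xs =>
      let p := takeRunB (pvKey x) xs
      [("label", pvKey x), ("content", PySem.Str.join "\n" (x :: p.1))] :: groupsB p.2
termination_by l => l.length
decreasing_by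
  simpa using Nat.lt_succ_of_le (takeRunB_snd_length (pvKey x) xs)

-- A's loop invariant: with a nonempty current chunk labelled lab, A's loop emits exactly
-- the chunk extended by the maximal run of lab-keyed lines, then the groups of the rest
theorem splitLoopA_eq (rest : List String) :
    ∀ (chunks : List (List (String × String))) (cur : List String) (lab : String),
      cur ≠ [] →
      splitLoopA rest chunks cur lab =
        chunks ++
          ([("label", lab),
            ("content", PySem.Str.join "\n" (cur ++ (takeRunB lab rest).1))]
            :: groupsB (takeRunB lab rest).2) := by
  induction rest with
  | nil =>
      intro chunks cur lab hcur
      simp [splitLoopA, takeRunB, groupsB, hcur]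
  | cons line rest ih =>
      intro chunks cur lab hcur
      by_cases hk : pvKey line = lab
      · have : ¬ (pvKey line ≠ lab ∧ cur ≠ []) := by simp [hk]
        simp only [splitLoopA, this, takeRunB, if_pos hk]
        rw [ih chunks (cur ++ [line]) (pvKey line) (by simp)]
        simp [hk, List.append_assoc]
      · have hcond : (pvKey line ≠ lab ∧ cur ≠ []) := ⟨hk, hcur⟩
        simp only [splitLoopA, if_pos hcond, takeRunB, if_neg hk]
        rw [ih _ [line] (pvKey line) (by simp)]
        simp [groupsB, List.append_assoc]

theorem portA_eq_groupsB (lines : List String) :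
    splitLoopA lines [] [] "" = groupsB lines := by
  cases lines with
  | nil => simp [splitLoopA, groupsB]
  | cons x xs =>
      have h : ¬ (pvKey x ≠ "" ∧ ([] : List String) ≠ []) := by simp
      simp only [splitLoopA, if_neg h]
      rw [show ([] ++ [x] : List String) = [x] by simp, splitLoopA_eq xs [] [x] (pvKey x) (by simp)]
      simp [groupsB]

-- B's body over an arbitrary line list
def chunksOfB (lines : List String) : List (List (String × String)) :=
  let labels := lines.map pvKey
  let n : Int := lines.length
  let cuts : List Int :=
    0 :: (PySem.List.pyRange 1 n 1).filter
          (fun i => decide (PySem.List.pyGetD labels i "" ≠ PySem.List.pyGetD labels (i - 1) ""))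
        ++ [n]
  (cuts.zip cuts.tail).map (fun se =>
    [("label", PySem.List.pyGetD labels se.1 ""),
     ("content", PySem.Str.join "\n" (PySem.List.slice lines (some se.1) (some se.2)))])

-- breakpoints of lines: the indices i (1 ≤ i ≤ n-1) where the label changes
def bps : List String → List Nat
  | [] => []
  | [_] => []
  | a :: b :: t => (if pvKey b ≠ pvKey a then [1] else []) ++ (bps (b :: t)).map (· + 1)

-- pyGetD on a cons at index ≥ 1 reads the tail
theorem pyGetD_cons_one_le (x : String) (l : List String) (i : Int) (h : 1 ≤ i) (d : String) :
    PySem.List.pyGetD (x :: l) i d = PySem.List.pyGetD l (i - 1) d := by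
  obtain ⟨j, rfl⟩ : ∃ j : Nat, i = ((j:Int) + 1) := ⟨(i-1).toNat, by omega⟩
  have h1 : ((j:Int) + 1) = (((j+1 : Nat)):Int) := by push_cast; ring
  rw [h1, PySem.List.pyGetD_natCast]
  have h2 : (((j+1 : Nat)):Int) - 1 = ((j:Nat):Int) := by push_cast; ring
  rw [h2, PySem.List.pyGetD_natCast]
  simp [List.getD]

theorem pyRange_two_shift (m : Nat) :
    PySem.List.pyRange 2 ((m:Int)+1) 1 = (PySem.List.pyRange 1 (m:Int) 1).map (· + 1) := by
  rw [PySem.List.pyRange_one, PySem.List.pyRange_one, List.map_map]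
  have h : ((m:Int)+1-2).toNat = ((m:Int)-1).toNat := by omega
  rw [h]
  exact List.map_congr_left (fun k _ => show (2:Int)+k = (1+(k:Int))+1 by ring)

-- B's filtered range is exactly the breakpoints, cast to Int
theorem filter_eq_bps (lines : List String) :
    (PySem.List.pyRange 1 (lines.length : Int) 1).filter
      (fun i => decide (PySem.List.pyGetD (lines.map pvKey) i "" ≠ PySem.List.pyGetD (lines.map pvKey) (i - 1) ""))
    = (bps lines).map (fun k : Nat => (k : Int)) := by
  induction lines with
  | nil => simp [bps, PySem.List.pyRange_one_eq_nil]
  | cons a t ih =>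
      cases t with
      | nil => simp [bps, PySem.List.pyRange_one_eq_nil]
      | cons b t' =>
          set P : Int → Bool := fun i =>
            decide (PySem.List.pyGetD ((a :: b :: t').map pvKey) i "" ≠
                    PySem.List.pyGetD ((a :: b :: t').map pvKey) (i - 1) "") with hP
          set Q : Int → Bool := fun i =>
            decide (PySem.List.pyGetD ((b :: t').map pvKey) i "" ≠
                    PySem.List.pyGetD ((b :: t').map pvKey) (i - 1) "") with hQ
          have hm : ((a :: b :: t').length : Int) = ((b :: t').length : Int) + 1 := by
            simp only [List.length_cons]; push_cast; ring
          have hm1 : (1:Int) ≤ ((b :: t').length : Int) := by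
            simp only [List.length_cons]; push_cast; omega
          have h12 : PySem.List.pyRange 1 2 1 = [(1:Int)] := by
            rw [show (2:Int) = 1 + 1 by ring]; exact PySem.List.pyRange_one_singleton 1
          rw [hm, PySem.List.pyRange_one_append 1 2 (((b :: t').length : Int) + 1) (by omega) (by omega),
              List.filter_append, h12]
          have hcons : ((a :: b :: t').map pvKey) = pvKey a :: ((b :: t').map pvKey) := by simp
          have piece2 : List.filter P (PySem.List.pyRange 2 (((b :: t').length : Int) + 1) 1)
              = (((bps (b :: t')).map (fun k : Nat => (k : Int))).map (· + 1)) := by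
            rw [pyRange_two_shift, List.filter_map]
            have hcg : List.filter (P ∘ (· + 1)) (PySem.List.pyRange 1 ((b :: t').length : Int) 1)
                = List.filter Q (PySem.List.pyRange 1 ((b :: t').length : Int) 1) := by
              refine List.filter_congr ?_
              intro i hi
              have hi1 : 1 ≤ i := ((PySem.List.mem_pyRange_one).1 hi).1
              simp only [Function.comp, hP, hQ]
              have e1 : PySem.List.pyGetD ((a :: b :: t').map pvKey) (i + 1) "" =
                  PySem.List.pyGetD ((b :: t').map pvKey) i "" := by
                rw [hcons, pyGetD_cons_one_le _ _ _ (by omega)]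
                congr 1; ring
              have e2 : PySem.List.pyGetD ((a :: b :: t').map pvKey) (i + 1 - 1) "" =
                  PySem.List.pyGetD ((b :: t').map pvKey) (i - 1) "" := by
                rw [show (i + 1 - 1) = i by ring, hcons, pyGetD_cons_one_le _ _ _ (by omega)]
              rw [e1, e2]
            rw [hcg, ih]
          have piece1 : List.filter P [(1:Int)] = if pvKey b ≠ pvKey a then [(1:Int)] else [] := by
            have g1 : PySem.List.pyGetD ((a :: b :: t').map pvKey) 1 "" = pvKey b := by
              rw [hcons, pyGetD_cons_one_le _ _ _ (by omega),
                  show (1:Int) - 1 = 0 by ring, List.map_cons, PySem.List.pyGetD_zero_cons]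
            have g0 : PySem.List.pyGetD ((a :: b :: t').map pvKey) (1 - 1) "" = pvKey a := by
              rw [show (1:Int) - 1 = 0 by ring, hcons, PySem.List.pyGetD_zero_cons]
            simp only [List.filter, hP, g1, g0]
            by_cases h : pvKey b = pvKey a <;> simp [h]
          rw [piece1, piece2]
          have hcast1 : (if pvKey b ≠ pvKey a then [(1:Int)] else []) =
              ((if pvKey b ≠ pvKey a then [1] else [] : List Nat)).map (fun k : Nat => (k : Int)) := by
            by_cases h : pvKey b = pvKey a <;> simp [h]
          have hcast2 : (((bps (b :: t')).map (fun k : Nat => (k : Int))).map (fun z : Int => z + 1)) =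
              ((bps (b :: t')).map (fun k : Nat => k + 1)).map (fun k : Nat => (k : Int)) := by
            simp only [List.map_map]
            exact List.map_congr_left
              (fun k _ => by simp only [Function.comp_apply]; push_cast; ring)
          rw [hcast1, hcast2, ← List.map_append]
          simp only [bps]

-- breakpoints through the run decomposition
theorem bps_run (xs : List String) : ∀ (x : String),
    bps (x :: xs) =
      if (takeRunB (pvKey x) xs).2 = [] then []
      else (1 + (takeRunB (pvKey x) xs).1.length) ::
        (bps (takeRunB (pvKey x) xs).2).map (· + (1 + (takeRunB (pvKey x) xs).1.length)) := by
  induction xs with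
  | nil => intro x; simp [takeRunB, bps]
  | cons y ys ih =>
      intro x
      by_cases hk : pvKey y = pvKey x
      · simp only [takeRunB, if_pos hk]
        have hb : bps (x :: y :: ys) = (bps (y :: ys)).map (· + 1) := by
          simp [bps, hk]
        rw [hb, ← hk, ih y]
        by_cases hr : (takeRunB (pvKey y) ys).2 = []
        · simp [hr]
        · simp only [if_neg hr, List.map_cons, List.map_map, List.cons.injEq]
          refine ⟨by simp [List.length_cons]; omega,
            List.map_congr_left (fun k _ => by simp [Function.comp, List.length_cons]; omega)⟩
      · simp only [takeRunB, if_neg hk]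
        simp only [if_neg (by simp : ¬ (y :: ys) = ([] : List String))]
        simp [bps, hk]

-- the split-off lemmas for the final assembly

-- lines = error_message.split("\n") is never empty
theorem splitOn_go_ne_nil (sep : List Char) (fuel : Nat) : ∀ (l cur : List Char) (acc : List (List Char)),
    PySem.Chars.splitOn.go sep fuel l cur acc ≠ [] := by
  induction fuel with
  | zero => intro l cur acc; simp [PySem.Chars.splitOn.go]
  | succ fuel ih =>
      intro l cur acc
      cases l with
      | nil => simp [PySem.Chars.splitOn.go]
      | cons c rest =>
          rw [PySem.Chars.splitOn.go]
          split
          · exact ih _ _ _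
          · exact ih _ _ _

theorem split_getD_ne_nil (s : String) : (PySem.Str.split? s "\n").getD [] ≠ [] := by
  simp [PySem.Str.split?, PySem.Chars.split?, PySem.Chars.splitOn]
  exact splitOn_go_ne_nil _ _ _ _ _

-- chunksOfB, with the filtered range replaced by the breakpoints
theorem chunksOfB_cuts (lines : List String) :
    chunksOfB lines =
      ((((0 : Int) :: (((bps lines).map (fun k : Nat => (k : Int))) ++ [((lines.length : Int))])).zip
        ((((bps lines).map (fun k : Nat => (k : Int))) ++ [((lines.length : Int))]))).map
        (fun se => [("label", PySem.List.pyGetD (lines.map pvKey) se.1 ""),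
                    ("content", PySem.Str.join "\n" (PySem.List.slice lines (some se.1) (some se.2)))])) := by
  simp only [chunksOfB]
  rw [filter_eq_bps]
  rfl

-- one record of B over the shifted pair equals the record over the rest
theorem rec_shift (x : String) (p1 p2 : List String) (s e : Int) (hs : 0 ≤ s) (he : 0 ≤ e) :
    (([("label", PySem.List.pyGetD (((x :: p1) ++ p2).map pvKey) (s + ((1 + p1.length : Nat) : Int)) ""),
       ("content", PySem.Str.join "\n" (PySem.List.slice ((x :: p1) ++ p2)
          (some (s + ((1 + p1.length : Nat) : Int))) (some (e + ((1 + p1.length : Nat) : Int)))))]) :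
        List (String × String))
    = [("label", PySem.List.pyGetD (p2.map pvKey) s ""),
       ("content", PySem.Str.join "\n" (PySem.List.slice p2 (some s) (some e)))] := by
  have hmap : (((x :: p1) ++ p2).map pvKey) = ((x :: p1).map pvKey) ++ (p2.map pvKey) := by
    simp
  have hlen1 : ((x :: p1).map pvKey).length = 1 + p1.length := by simp; omega
  have e1 : PySem.List.pyGetD (((x :: p1) ++ p2).map pvKey) (s + ((1 + p1.length : Nat) : Int)) ""
      = PySem.List.pyGetD (p2.map pvKey) s "" := by
    rw [hmap, show s + ((1 + p1.length : Nat) : Int) = (((s.toNat + (1 + p1.length) : Nat)) : Int) by push_cast; omega,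
        PySem.List.pyGetD_natCast, show s = ((s.toNat : Nat) : Int) by omega, PySem.List.pyGetD_natCast,
        List.getD_append_right _ _ _ _ (by omega)]
    congr 1
    omega
  have e2 : PySem.List.slice ((x :: p1) ++ p2)
      (some (s + ((1 + p1.length : Nat) : Int))) (some (e + ((1 + p1.length : Nat) : Int)))
      = PySem.List.slice p2 (some s) (some e) := by
    rw [PySem.List.slice_toNat _ (by omega) (by omega), PySem.List.slice_toNat _ hs he]
    have hd : (s + ((1 + p1.length : Nat) : Int)).toNat = (x :: p1).length + s.toNat := by
      simp only [List.length_cons]; omega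
    rw [hd, List.drop_length_add_append]
    congr 1
    omega
  rw [e1, e2]

-- every element of the rest's cut list is nonnegative
theorem cutsR_nonneg (p2 : List String) (z : Int)
    (hz : z ∈ ((0 : Int) :: ((bps p2).map (fun k : Nat => (k : Int))) ++ [((p2.length : Int))])) :
    0 ≤ z := by
  simp only [List.cons_append, List.mem_cons, List.mem_append, List.mem_map] at hz
  rcases hz with rfl | ⟨k, -, rfl⟩ | rfl | h
  · exact le_refl 0
  · positivity
  · positivity
  · simp at h

theorem chunksOfB_eq_groupsB_aux : ∀ (n : Nat) (lines : List String), lines.length ≤ n → lines ≠ [] →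
    chunksOfB lines = groupsB lines := by
  intro n
  induction n with
  | zero => intro lines hl hne; cases lines with
      | nil => exact absurd rfl hne
      | cons a t => simp at hl
  | succ n ih =>
      intro lines hl hne
      cases lines with
      | nil => exact absurd rfl hne
      | cons x xs =>
          rw [chunksOfB_cuts, bps_run xs x]
          set p := takeRunB (pvKey x) xs with hp
          have hxp : p.1 ++ p.2 = xs := takeRunB_append (pvKey x) xs
          have hlab : ∀ (z : Int), PySem.List.pyGetD (pvKey x :: xs.map pvKey) z "" =
              PySem.List.pyGetD ((x :: xs).map pvKey) z "" := by
            intro z; rw [List.map_cons]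
          by_cases hr : p.2 = []
          · -- single run: one record containing the whole line list
            have hx1 : x :: p.1 = x :: xs := by rw [← hxp, hr]; simp
            have hsl : PySem.List.slice (x :: xs) (some (0 : Int)) (some (((x :: xs).length : Int)))
                = x :: xs := by
              rw [show ((0 : Int)) = ((0 : Nat) : Int) by norm_num, PySem.List.slice_natCast]
              simp
            simp only [if_pos hr, List.map_nil, List.nil_append,
              List.zip_cons_cons, List.zip_nil_right, List.map_cons, List.map_nil]
            rw [hlab 0, List.map_cons, PySem.List.pyGetD_zero_cons, hsl]
            simp only [groupsB, ← hp, hr, hx1]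
          · -- at least two runs: peel the first record, shift the remaining cuts
            have hlines : x :: xs = (x :: p.1) ++ p.2 := by
              rw [List.cons_append, hxp]
            have hlenxs := congrArg List.length hxp
            simp only [List.length_append] at hlenxs
            have hL : (((x :: xs).length : Int)) = ((p.2.length : Int)) + ((1 + p.1.length : Nat) : Int) := by
              simp only [List.length_cons]
              push_cast
              omega
            have htail :
                ((bps p.2).map (fun k : Nat => (k + (1 + p.1.length) : Nat))).map (fun k : Nat => (k : Int))
                  ++ [(((x :: xs).length : Int))]
                = (((bps p.2).map (fun k : Nat => (k : Int))) ++ [((p.2.length : Int))]).map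
                    (fun z : Int => z + ((1 + p.1.length : Nat) : Int)) := by
              simp only [List.map_append, List.map_map, List.map_cons, List.map_nil]
              refine congrArg₂ _ ?_ (by rw [hL])
              exact (List.map_congr_left (fun k _ => by
                simp only [Function.comp_apply]; push_cast; ring)).symm
            have hcons2 : (((1 + p.1.length : Nat) : Int)) ::
                ((((bps p.2).map (fun k : Nat => (k : Int))) ++ [((p.2.length : Int))]).map
                  (fun z : Int => z + ((1 + p.1.length : Nat) : Int)))
                = (((0:Int) :: (((bps p.2).map (fun k : Nat => (k : Int))) ++ [((p.2.length : Int))])).map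
                    (fun z : Int => z + ((1 + p.1.length : Nat) : Int))) := by
              simp only [List.map_cons]
              norm_num
            have hheadsl : PySem.List.slice (x :: xs) (some (0:Int))
                (some ((1 + p.1.length : Nat) : Int)) = x :: p.1 := by
              rw [show ((0:Int)) = ((0 : Nat) : Int) by norm_num, PySem.List.slice_natCast, hlines]
              rw [show (1 + p.1.length) - 0 = (x :: p.1).length by simp; omega]
              simp
            simp only [if_neg hr, List.map_cons, List.cons_append, List.zip_cons_cons,
              List.map_cons]
            rw [hlab, List.map_cons, PySem.List.pyGetD_zero_cons, hheadsl, htail, hcons2,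
                List.zip_map, List.map_map]
            have hpt : ∀ se ∈ ((0:Int) :: (((bps p.2).map (fun k : Nat => (k : Int))) ++ [((p.2.length : Int))])).zip
                ((((bps p.2).map (fun k : Nat => (k : Int))) ++ [((p.2.length : Int))])),
                ((fun se => [("label", PySem.List.pyGetD (pvKey x :: xs.map pvKey) se.1 ""),
                    ("content", PySem.Str.join "\n" (PySem.List.slice (x :: xs) (some se.1) (some se.2)))]) ∘
                  Prod.map (fun z : Int => z + ((1 + p.1.length : Nat) : Int))
                           (fun z : Int => z + ((1 + p.1.length : Nat) : Int))) se
                = [("label", PySem.List.pyGetD (p.2.map pvKey) se.1 ""),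
                   ("content", PySem.Str.join "\n" (PySem.List.slice p.2 (some se.1) (some se.2)))] := by
              intro se hse
              obtain ⟨h1, h2⟩ := List.of_mem_zip hse
              have hs : 0 ≤ se.1 := cutsR_nonneg p.2 se.1 (by simpa using h1)
              have he : 0 ≤ se.2 := cutsR_nonneg p.2 se.2 (List.mem_cons_of_mem _ (by simpa using h2))
              simp only [Function.comp_apply, Prod.map]
              rw [hlab, show ((x :: xs).map pvKey) = (((x :: p.1) ++ p.2).map pvKey) by rw [← hlines],
                  show (x :: xs) = ((x :: p.1) ++ p.2) from hlines]
              exact rec_shift x p.1 p.2 se.1 se.2 hs he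
            rw [List.map_congr_left hpt, ← chunksOfB_cuts p.2,
                ih p.2 (by simp only [List.length_cons] at hl; omega) hr]
            simp only [groupsB, ← hp]
-- ===== VERDICT (by name: the statement is the Claim_ definition above) =====
theorem split_error_message_py_spec : Claim_equal_split_error_message_py := by
  intro em _
  show split_error_message_py em = split_error_message_py_alt em
  unfold split_error_message_py split_error_message_py_alt
  rw [portA_eq_groupsB]
  exact (chunksOfB_eq_groupsB_aux _ _ le_rfl (split_getD_ne_nil em)).symm
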